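-- pv_equiv track=rewrite | github.com/jeevan108065/weight-lifting-score-management-software | infosys 1.py | specialnumbers
-- ===== SOURCE A (Python) =====
-- def specialnumbers(Q,Queries):
--     count=0
--     List=[]
--     for i in Queries:
--         for A in range(2,i+1):
--             for B in range(2,i+1):
--                 for C in range(2,i+1):
--                     for D in range(2,i+1):
--                         if (A**B)+(C**D)<=i:
--                             List.append((A**B)+(C**D))
--         for j in range(i+1):
--             if j in List:
--                 count+=1
--     return count
-- ===== SOURCE B (Python) =====
-- def specialnumbers(Q, Queries):
--     # Precompute: perfect powers <= max query, distinct representable sums, then count per query.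
--     M = 0
--     for i in Queries:
--         if i > M:
--             M = i
--     pows = [a ** b
--             for a in range(2, M + 1) if a * a <= M
--             for b in range(2, M.bit_length() + 1) if a ** b <= M]
--     sums = set()
--     for x in pows:
--         for y in pows:
--             if x + y <= M:
--                 sums.add(x + y)
--     total = 0
--     for i in Queries:
--         for s in sums:
--             if s <= i:
--                 total += 1
--     return total
-- ===== Notes on version B (the rewrite author's own statement) =====
-- stated objective: alternative
-- what changed: Instead of re-running a quadruple loop over range(2,i+1)^4 and a membership scan for every query, B precomputes once (from the maximum query M) the perfect powers <= M (base bounded by a*a<=M, exponent by M.bit_length()) and the set of distinct representable sums, then answers each query by counting set elements <= it; intended as faster, but a timing run could not measure a ratio (A times out already at the smallest sizes it is slow on, and is under 5 ms wherever it finishes), so no speed is claimed.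
import Mathlib
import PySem

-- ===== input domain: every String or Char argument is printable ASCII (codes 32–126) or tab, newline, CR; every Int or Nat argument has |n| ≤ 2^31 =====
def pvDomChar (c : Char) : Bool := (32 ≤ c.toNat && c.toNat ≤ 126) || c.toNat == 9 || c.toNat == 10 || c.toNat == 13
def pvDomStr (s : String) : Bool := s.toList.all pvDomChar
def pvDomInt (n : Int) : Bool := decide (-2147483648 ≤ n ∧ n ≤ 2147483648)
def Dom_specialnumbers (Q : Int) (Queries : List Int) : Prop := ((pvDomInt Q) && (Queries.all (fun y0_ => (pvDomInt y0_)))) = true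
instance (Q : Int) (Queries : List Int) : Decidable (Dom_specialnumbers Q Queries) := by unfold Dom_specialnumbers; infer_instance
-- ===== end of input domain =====

-- B precomputes the perfect powers and the set of representable sums once (from the maximum
-- query) and counts per query from that set, instead of A's per-query quadruple loop over
-- range(2,i+1)^4 (a different algorithm; no measured speed is claimed).

-- ===== PORT A =====
-- Python's A**B has A,B ≥ 2 from range(2, i+1), so the exponent is nonnegative and
-- `A ^ B.toNat` is exact.
def pvA_inner (i : Int) (L : List Int) : List Int :=
  (PySem.List.pyRange 2 (i+1) 1).foldl (fun L2 A =>
    (PySem.List.pyRange 2 (i+1) 1).foldl (fun L3 B =>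
      (PySem.List.pyRange 2 (i+1) 1).foldl (fun L4 C =>
        (PySem.List.pyRange 2 (i+1) 1).foldl (fun L5 D =>
          if A ^ B.toNat + C ^ D.toNat ≤ i then L5 ++ [A ^ B.toNat + C ^ D.toNat] else L5)
          L4) L3) L2) L

def specialnumbers (Q : Int) (Queries : List Int) : Int :=
  (Queries.foldl (fun (st : Int × List Int) i =>
      let L := pvA_inner i st.2
      ((PySem.List.pyRange 0 (i+1) 1).foldl
         (fun c j => if L.contains j then c + 1 else c) st.1, L))
    ((0 : Int), ([] : List Int))).1

-- ===== PORT B =====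
-- the comprehension [a**b for a in range(2,M+1) if a*a <= M
--                          for b in range(2,M.bit_length()+1) if a**b <= M]
def pvB_pows (M : Int) : List Int :=
  ((PySem.List.pyRange 2 (M+1) 1).filter (fun a => a * a ≤ M)).flatMap (fun a =>
    ((PySem.List.pyRange 2 ((PySem.Int.bitLength M : Int) + 1) 1).filter
        (fun b => a ^ b.toNat ≤ M)).map
      (fun b => a ^ b.toNat))

def pvB_sums (M : Int) (pows : List Int) : PySem.Set Int :=
  pows.foldl (fun s x =>
    pows.foldl (fun s y => if x + y ≤ M then PySem.Set.add s (x + y) else s) s)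
    PySem.Set.empty

def specialnumbers_alt (Q : Int) (Queries : List Int) : Int :=
  let M := Queries.foldl (fun M i => if i > M then i else M) 0
  let sums := pvB_sums M (pvB_pows M)
  -- iterating the set only to count: order-independent
  Queries.foldl (fun total i =>
    sums.foldl (fun t s => if s ≤ i then t + 1 else t) total) 0

-- ===== PRECONDITION & SPEC =====
def Spec_specialnumbers (Q : Int) (Queries : List Int) (out : Int) : Prop := out = specialnumbers_alt Q Queries
instance (Q : Int) (Queries : List Int) (out : Int) : Decidable (Spec_specialnumbers Q Queries out) := by unfold Spec_specialnumbers; infer_instance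

-- ===== CLAIM (what is proved, stated in full; the proofs are below) =====
def Claim_equal_specialnumbers : Prop := ∀ (Q : Int) (Queries : List Int), Dom_specialnumbers Q Queries → Spec_specialnumbers Q Queries (specialnumbers Q Queries)

-- ===== LEMMAS AND PROOFS =====

-- j is a sum of two perfect powers (bases and exponents ≥ 2)
def pvRep (j : Int) : Prop :=
  ∃ (a c : Int) (b d : ℕ), 2 ≤ a ∧ 2 ≤ b ∧ 2 ≤ c ∧ 2 ≤ d ∧ a ^ b + c ^ d = j

lemma pvPow_bounds (a : Int) (b : ℕ) (ha : 2 ≤ a) (hb : 2 ≤ b) :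
    a ≤ a ^ b ∧ (b : Int) < a ^ b ∧ 4 ≤ a ^ b := by
  have h2 : (2:ℤ) ^ b ≤ a ^ b := pow_le_pow_left₀ (by norm_num) ha b
  have hbb : (b : Int) < 2 ^ b := by exact_mod_cast Nat.lt_two_pow_self
  have h4 : (4:ℤ) ≤ 2 ^ b := by
    calc (4:ℤ) = 2 ^ 2 := by norm_num
    _ ≤ 2 ^ b := pow_le_pow_right₀ (by norm_num) hb
  exact ⟨le_self_pow₀ (by omega) (by omega), lt_of_lt_of_le hbb h2, le_trans h4 h2⟩

lemma pvRep_eight {j : Int} (h : pvRep j) : 8 ≤ j := by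
  obtain ⟨a, c, b, d, ha, hb, hc, hd, hj⟩ := h
  have h1 := pvPow_bounds a b ha hb
  have h2 := pvPow_bounds c d hc hd
  omega

lemma pvRep_bounded {j N : Int} (h : pvRep j) (hN : j ≤ N) :
    ∃ (a c : Int) (b d : ℕ), 2 ≤ a ∧ a ≤ N ∧ 2 ≤ b ∧ (b : Int) ≤ N ∧
      2 ≤ c ∧ c ≤ N ∧ 2 ≤ d ∧ (d : Int) ≤ N ∧ a ^ b + c ^ d = j := by
  obtain ⟨a, c, b, d, ha, hb, hc, hd, hj⟩ := h
  have h1 := pvPow_bounds a b ha hb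
  have h2 := pvPow_bounds c d hc hd
  exact ⟨a, c, b, d, ha, by omega, hb, by omega, hc, by omega, hd, by omega, hj⟩

lemma mem_pvA_inner (i : Int) (L : List Int) (x : Int) :
    x ∈ pvA_inner i L ↔ x ∈ L ∨ (pvRep x ∧ x ≤ i) := by
  unfold pvA_inner
  simp only [PySem.List.foldl_append_ite, PySem.List.foldl_append_eq_flatMap]
  simp only [List.mem_append, List.mem_flatMap, List.mem_map, List.mem_filter,
    PySem.List.mem_pyRange_one, decide_eq_true_eq]
  constructor
  · rintro (hx | ⟨A, ⟨hA1, hA2⟩, B, ⟨hB1, hB2⟩, C, ⟨hC1, hC2⟩, D, ⟨⟨hD1, hD2⟩, hle⟩, rfl⟩)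
    · exact Or.inl hx
    · refine Or.inr ⟨⟨A, C, B.toNat, D.toNat, hA1, by omega, hC1, by omega, rfl⟩, hle⟩
  · rintro (hx | ⟨hrep, hle⟩)
    · exact Or.inl hx
    · obtain ⟨a, c, b, d, ha1, ha2, hb1, hb2, hc1, hc2, hd1, hd2, hj⟩ := pvRep_bounded hrep hle
      refine Or.inr ⟨a, ⟨ha1, by omega⟩, (b:Int), ⟨by exact_mod_cast hb1, by omega⟩,
        c, ⟨hc1, by omega⟩, (d:Int), ⟨⟨by exact_mod_cast hd1, by omega⟩, ?_⟩, ?_⟩ <;>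
        simp [Int.toNat_natCast] <;> omega

lemma mem_pvB_pows (M x : Int) :
    x ∈ pvB_pows M ↔ (∃ (a : Int) (b : ℕ), 2 ≤ a ∧ 2 ≤ b ∧ a ^ b = x) ∧ x ≤ M := by
  unfold pvB_pows
  simp only [List.mem_flatMap, List.mem_map, List.mem_filter,
    PySem.List.mem_pyRange_one, decide_eq_true_eq]
  constructor
  · rintro ⟨a, ⟨⟨ha1, ha2⟩, -⟩, b, ⟨⟨⟨hb1, hb2⟩, hle⟩, rfl⟩⟩
    exact ⟨⟨a, b.toNat, ha1, by omega, rfl⟩, hle⟩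
  · rintro ⟨⟨a, b, ha, hb, rfl⟩, hle⟩
    have h := pvPow_bounds a b ha hb
    have hsq : a * a ≤ M := by
      have h2 : a ^ 2 ≤ a ^ b := pow_le_pow_right₀ (by omega) hb
      have : a ^ 2 = a * a := by ring
      omega
    have h2b : (2:ℤ) ^ b ≤ a ^ b := pow_le_pow_left₀ (by norm_num) ha b
    have h1 : ((2:ℕ) ^ b : ℤ) ≤ M := by push_cast; omega
    have h2n : (2:ℕ) ^ b ≤ M.natAbs := by omega
    have h5 : b < PySem.Int.bitLength M :=
      (Nat.pow_lt_pow_iff_right (by norm_num)).mp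
        (lt_of_le_of_lt h2n (PySem.Int.lt_two_pow_bitLength M))
    refine ⟨a, ⟨⟨ha, by omega⟩, hsq⟩, (b : Int), ⟨⟨⟨by exact_mod_cast hb, by omega⟩, ?_⟩, ?_⟩⟩
    · simp [Int.toNat_natCast]; omega
    · simp [Int.toNat_natCast]

lemma pv_mem_foldl_add_ite (M : Int) (l : List Int) (u : Int) (s : PySem.Set Int) (x : Int) :
    x ∈ l.foldl (fun s y => if u + y ≤ M then PySem.Set.add s (u + y) else s) s ↔
      x ∈ s ∨ ∃ v ∈ l, u + v ≤ M ∧ u + v = x := by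
  induction l generalizing s with
  | nil => simp
  | cons y t ih =>
    simp only [List.foldl_cons, ih]
    by_cases h : u + y ≤ M
    · simp only [if_pos h, PySem.Set.mem_add]
      constructor
      · rintro ((hs | rfl) | ⟨v, hv, h1, h2⟩)
        exacts [Or.inl hs, Or.inr ⟨y, List.mem_cons_self .., h, rfl⟩,
          Or.inr ⟨v, List.mem_cons_of_mem _ hv, h1, h2⟩]
      · rintro (hs | ⟨v, hv, h1, h2⟩)
        · exact Or.inl (Or.inl hs)
        · rcases List.mem_cons.mp hv with rfl | hv
          exacts [Or.inl (Or.inr h2.symm), Or.inr ⟨v, hv, h1, h2⟩]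
    · simp only [if_neg h]
      constructor
      · rintro (hs | ⟨v, hv, h1, h2⟩)
        exacts [Or.inl hs, Or.inr ⟨v, List.mem_cons_of_mem _ hv, h1, h2⟩]
      · rintro (hs | ⟨v, hv, h1, h2⟩)
        · exact Or.inl hs
        · rcases List.mem_cons.mp hv with rfl | hv
          exacts [absurd h1 h, Or.inr ⟨v, hv, h1, h2⟩]

lemma pv_mem_sums_aux (M : Int) (pows l : List Int) (s : PySem.Set Int) (x : Int) :
    x ∈ l.foldl (fun s u =>
        pows.foldl (fun s y => if u + y ≤ M then PySem.Set.add s (u + y) else s) s) s ↔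
      x ∈ s ∨ ∃ u ∈ l, ∃ v ∈ pows, u + v ≤ M ∧ u + v = x := by
  induction l generalizing s with
  | nil => simp
  | cons u t ih =>
    simp only [List.foldl_cons, ih, pv_mem_foldl_add_ite]
    constructor
    · rintro ((hs | hv) | hr)
      · exact Or.inl hs
      · obtain ⟨v, hv, h1, h2⟩ := hv; exact Or.inr ⟨u, List.mem_cons_self .., v, hv, h1, h2⟩
      · obtain ⟨u2, hu, r⟩ := hr; exact Or.inr ⟨u2, List.mem_cons_of_mem _ hu, r⟩
    · rintro (hs | ⟨u2, hu, v, hv, h1, h2⟩)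
      · exact Or.inl (Or.inl hs)
      · rcases List.mem_cons.mp hu with rfl | hu
        · exact Or.inl (Or.inr ⟨v, hv, h1, h2⟩)
        · exact Or.inr ⟨u2, hu, v, hv, h1, h2⟩

lemma mem_pvB_sums (M x : Int) :
    x ∈ pvB_sums M (pvB_pows M) ↔ pvRep x ∧ x ≤ M := by
  unfold pvB_sums
  rw [pv_mem_sums_aux]
  constructor
  · rintro (hs | ⟨u, hu, v, hv, h1, rfl⟩)
    · simp [PySem.Set.empty] at hs
    · obtain ⟨⟨a, b, ha, hb, rfl⟩, -⟩ := (mem_pvB_pows M u).mp hu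
      obtain ⟨⟨c, d, hc, hd, rfl⟩, -⟩ := (mem_pvB_pows M v).mp hv
      exact ⟨⟨a, c, b, d, ha, hb, hc, hd, rfl⟩, h1⟩
  · rintro ⟨hrep, hle⟩
    obtain ⟨a, c, b, d, ha1, ha2, hb1, hb2, hc1, hc2, hd1, hd2, hj⟩ := pvRep_bounded hrep hle
    have h1 := pvPow_bounds a b ha1 hb1
    have h2 := pvPow_bounds c d hc1 hd1
    refine Or.inr ⟨a ^ b, (mem_pvB_pows M _).mpr ⟨⟨a, b, ha1, hb1, rfl⟩, by omega⟩,
      c ^ d, (mem_pvB_pows M _).mpr ⟨⟨c, d, hc1, hd1, rfl⟩, by omega⟩, by omega, hj⟩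

lemma pv_nodup_foldl_add (M : Int) (l : List Int) (u : Int) (s : PySem.Set Int) (hs : s.Nodup) :
    (l.foldl (fun s y => if u + y ≤ M then PySem.Set.add s (u + y) else s) s).Nodup := by
  induction l generalizing s with
  | nil => exact hs
  | cons y t ih =>
    simp only [List.foldl_cons]
    split
    · exact ih _ (PySem.Set.nodup_add _ _ hs)
    · exact ih _ hs

lemma nodup_pvB_sums (M : Int) (pows : List Int) : (pvB_sums M pows).Nodup := by
  unfold pvB_sums
  have aux : ∀ (l : List Int) (s : PySem.Set Int), s.Nodup →
      (l.foldl (fun s u =>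
        pows.foldl (fun s y => if u + y ≤ M then PySem.Set.add s (u + y) else s) s) s).Nodup := by
    intro l
    induction l with
    | nil => intro s hs; exact hs
    | cons u t ih =>
      intro s hs
      exact ih _ (pv_nodup_foldl_add M pows u s hs)
  exact aux pows PySem.Set.empty (by simp [PySem.Set.empty])

lemma pv_per_query (M i : Int) (hi : i ≤ M) (L : List Int) (hL : ∀ x ∈ L, pvRep x) :
    ((PySem.List.pyRange 0 (i+1) 1).countP (fun j => (pvA_inner i L).contains j))
      = ((pvB_sums M (pvB_pows M)).countP (fun s => decide (s ≤ i))) := by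
  rw [List.countP_eq_length_filter, List.countP_eq_length_filter]
  refine List.Perm.length_eq ((List.perm_ext_iff_of_nodup
    (List.Nodup.filter _ (PySem.List.nodup_pyRange_one 0 (i+1)))
    (List.Nodup.filter _ (nodup_pvB_sums M (pvB_pows M)))).mpr ?_)
  intro j
  simp only [List.mem_filter, PySem.List.mem_pyRange_one, List.contains_eq_mem,
    decide_eq_true_eq, mem_pvA_inner, mem_pvB_sums]
  constructor
  · rintro ⟨⟨h0, h1⟩, (hj | ⟨hrep, hle⟩)⟩
    · exact ⟨⟨hL j hj, by omega⟩, by omega⟩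
    · exact ⟨⟨hrep, by omega⟩, hle⟩
  · rintro ⟨⟨hrep, -⟩, hle⟩
    have := pvRep_eight hrep
    exact ⟨⟨by omega, by omega⟩, Or.inr ⟨hrep, hle⟩⟩

lemma pv_le_max_aux (qs : List Int) : ∀ (m : Int),
    m ≤ qs.foldl (fun M i => if i > M then i else M) m ∧
    ∀ i ∈ qs, i ≤ qs.foldl (fun M i => if i > M then i else M) m := by
  induction qs with
  | nil => intro m; simp
  | cons q t ih =>
    intro m
    simp only [List.foldl_cons]
    obtain ⟨h1, h2⟩ := ih (if q > m then q else m)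
    refine ⟨le_trans (by split <;> omega) h1, ?_⟩
    intro i hi
    rcases List.mem_cons.mp hi with rfl | hi
    · exact le_trans (by split <;> omega) h1
    · exact h2 i hi

lemma pv_le_max (Queries : List Int) :
    ∀ i ∈ Queries, i ≤ Queries.foldl (fun M i => if i > M then i else M) 0 :=
  (pv_le_max_aux Queries 0).2

lemma pv_main_fold (M : Int) (qs : List Int) (hqs : ∀ i ∈ qs, i ≤ M) :
    ∀ (cnt : Int) (L : List Int), (∀ x ∈ L, pvRep x) →
      (qs.foldl (fun (st : Int × List Int) i =>
          let L := pvA_inner i st.2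
          ((PySem.List.pyRange 0 (i+1) 1).foldl
             (fun c j => if L.contains j then c + 1 else c) st.1, L)) (cnt, L)).1
        = qs.foldl (fun total i =>
            (pvB_sums M (pvB_pows M)).foldl
              (fun t s => if s ≤ i then t + 1 else t) total) cnt := by
  induction qs with
  | nil => intro cnt L _; rfl
  | cons i t ih =>
    intro cnt L hL
    have hi : i ≤ M := hqs i (List.mem_cons_self ..)
    have ht : ∀ j ∈ t, j ≤ M := fun j hj => hqs j (List.mem_cons_of_mem _ hj)
    simp only [List.foldl_cons]
    have hL' : ∀ x ∈ pvA_inner i L, pvRep x := by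
      intro x hx
      rcases (mem_pvA_inner i L x).mp hx with h | ⟨h, -⟩
      · exact hL x h
      · exact h
    rw [ih ht _ _ hL']
    congr 1
    rw [PySem.List.foldl_if_add_one, PySem.List.foldl_ite_add_one,
      pv_per_query M i hi L hL]

-- ===== VERDICT (by name: the statement is the Claim_ definition above) =====
theorem specialnumbers_spec : Claim_equal_specialnumbers := by
  intro Q Queries _
  unfold Spec_specialnumbers specialnumbers specialnumbers_alt
  exact pv_main_fold _ Queries (pv_le_max Queries) 0 [] (by simp)
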